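-- pv_equiv track=rewrite | github.com/Yousha-dev/crypto-intelligence-platform | src/myapp/oldfetchers/mock_reddit.py | has_repeated_phrases
-- ===== SOURCE A (Python) =====
-- def has_repeated_phrases(text: str) -> bool:
--     """Check for repeated phrases that might indicate spam"""
--     words = text.split()
--     if len(words) < 10:
--         return False
--
--     phrases = [' '.join(words[i:i+3]) for i in range(len(words)-2)]
--     phrase_counts = {}
--     for phrase in phrases:
--         phrase_counts[phrase] = phrase_counts.get(phrase, 0) + 1
--
--     return any(count > 2 for count in phrase_counts.values())
-- ===== SOURCE B (Python) =====
-- def has_repeated_phrases(text: str) -> bool: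
--     """Check for repeated phrases that might indicate spam"""
--     words = text.split()
--     if len(words) < 10:
--         return False
--     phrases = sorted(' '.join(t) for t in zip(words, words[1:], words[2:]))
--     prev = None
--     run = 1
--     for p in phrases:
--         run = run + 1 if p == prev else 1
--         if run > 2:
--             return True
--         prev = p
--     return False
-- ===== Notes on version B (the rewrite author's own statement) =====
-- stated objective: alternative
-- what changed: Replaces the hash-table phrase counting (dict of counts, then any(count > 2)) by sort-then-run-scan: build the 3-word phrases by zipping the word list with its two tails, sort them, and scan once with a run-length counter, returning True as soon as a run exceeds 2.
import Mathlib
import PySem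

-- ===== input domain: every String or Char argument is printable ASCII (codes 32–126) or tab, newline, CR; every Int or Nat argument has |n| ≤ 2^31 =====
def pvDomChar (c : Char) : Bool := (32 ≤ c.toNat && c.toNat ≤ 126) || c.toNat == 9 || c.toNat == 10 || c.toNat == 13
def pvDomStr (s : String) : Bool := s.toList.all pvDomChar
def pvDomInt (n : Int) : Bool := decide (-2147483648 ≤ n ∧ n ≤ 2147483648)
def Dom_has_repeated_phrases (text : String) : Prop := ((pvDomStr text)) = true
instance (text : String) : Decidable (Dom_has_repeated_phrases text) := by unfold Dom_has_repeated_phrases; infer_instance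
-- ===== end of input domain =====

-- B replaces the hash-table phrase counting by sort-then-run-scan: phrases are built by zipping
-- the word list with its two tails, sorted, and scanned once with a run-length counter that
-- reports a run longer than 2; same result, alternative algorithm (not claimed faster).

-- ===== PORT A =====
def has_repeated_phrases (text : String) : Bool :=
  let words := PySem.Str.split₀ text
  if words.length < 10 then false
  else
    let phrases := (PySem.List.pyRange 0 ((words.length : Int) - 2) 1).map
      (fun i => PySem.Str.join " " (PySem.List.slice words (some i) (some (i + 3))))
    let counts := phrases.foldl (fun d p => d.insert p (d.getD p 0 + 1))
      (PySem.Dict.empty : PySem.Dict String Int)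
    counts.values.any (fun c => c > 2)

-- ===== PORT B =====
-- the for-loop with early return: run-length counter over the sorted phrase list
def pvRunLoop : List String → Option String → Int → Bool
  | [], _, _ => false
  | p :: rest, prev, run =>
    let run' := if some p == prev then run + 1 else 1
    if run' > 2 then true else pvRunLoop rest (some p) run'

def has_repeated_phrases_alt (text : String) : Bool :=
  let words := PySem.Str.split₀ text
  if words.length < 10 then false
  else
    let phrases := PySem.List.sorted
      ((words.zip ((PySem.List.slice words (some 1) none).zip
                   (PySem.List.slice words (some 2) none))).map
        (fun t => PySem.Str.join " " [t.1, t.2.1, t.2.2]))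
      (fun x => x) false
    pvRunLoop phrases none 1

-- ===== PRECONDITION & SPEC =====
def Spec_has_repeated_phrases (text : String) (out : Bool) : Prop := out = has_repeated_phrases_alt text
instance (text : String) (out : Bool) : Decidable (Spec_has_repeated_phrases text out) := by unfold Spec_has_repeated_phrases; infer_instance

-- ===== CLAIM (what is proved, stated in full; the proofs are below) =====
def Claim_equal_has_repeated_phrases : Prop := ∀ (text : String), Dom_has_repeated_phrases text → Spec_has_repeated_phrases text (has_repeated_phrases text)

-- ===== LEMMAS AND PROOFS =====

-- l contains three equal consecutive elements
def pvTrip (l : List String) : Prop := ∃ pre x suf, l = pre ++ x :: x :: x :: suf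

theorem pvTrip_cons_iff (a : String) (t : List String) :
    pvTrip (a :: t) ↔ (∃ suf, t = a :: a :: suf) ∨ pvTrip t := by
  constructor
  · rintro ⟨pre, x, suf, h⟩
    cases pre with
    | nil => simp at h; exact Or.inl ⟨suf, by simp [h.1 ▸ h.2]⟩
    | cons b pre' =>
      simp only [List.cons_append, List.cons.injEq] at h
      exact Or.inr ⟨pre', x, suf, h.2⟩
  · rintro (⟨suf, h⟩ | ⟨pre, x, suf, h⟩)
    · exact ⟨[], a, suf, by simp [h]⟩
    · exact ⟨a :: pre, x, suf, by simp [h]⟩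

-- the run-length loop, characterised for the states it actually reaches
theorem pvRunLoop_some (l : List String) : ∀ p : String,
    (pvRunLoop l (some p) 1 = true ↔ (∃ suf, l = p :: p :: suf) ∨ pvTrip l) ∧
    (pvRunLoop l (some p) 2 = true ↔ (∃ suf, l = p :: suf) ∨ pvTrip l) := by
  induction l with
  | nil =>
    intro p
    constructor <;> simp [pvRunLoop, pvTrip]
  | cons q t ih =>
    intro p
    constructor
    · by_cases hqp : q = p
      · subst hqp
        have hstep : pvRunLoop (q :: t) (some q) 1 = pvRunLoop t (some q) 2 := by
          simp [pvRunLoop]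
        rw [hstep, (ih q).2, pvTrip_cons_iff]
        constructor
        · rintro (⟨suf, h⟩ | h)
          · exact Or.inl ⟨suf, by rw [h]⟩
          · exact Or.inr (Or.inr h)
        · rintro (⟨suf, h⟩ | ⟨suf, h⟩ | h)
          · injection h with _ h2
            exact Or.inl ⟨suf, h2⟩
          · exact Or.inl ⟨q :: suf, h⟩
          · exact Or.inr h
      · have hbe : (some q == some p) = false := by simp [hqp]
        have hstep : pvRunLoop (q :: t) (some p) 1 = pvRunLoop t (some q) 1 := by
          simp [pvRunLoop, hbe]
        rw [hstep, (ih q).1, pvTrip_cons_iff]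
        constructor
        · exact fun h => Or.inr h
        · rintro (⟨suf, h⟩ | h)
          · injection h with h1 _
            exact absurd h1 hqp
          · exact h
    · by_cases hqp : q = p
      · subst hqp
        have hstep : pvRunLoop (q :: t) (some q) 2 = true := by
          simp [pvRunLoop]
        rw [hstep]
        exact ⟨fun _ => Or.inl ⟨t, rfl⟩, fun _ => rfl⟩
      · have hbe : (some q == some p) = false := by simp [hqp]
        have hstep : pvRunLoop (q :: t) (some p) 2 = pvRunLoop t (some q) 1 := by
          simp [pvRunLoop, hbe]
        rw [hstep, (ih q).1, pvTrip_cons_iff]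
        constructor
        · exact fun h => Or.inr h
        · rintro (⟨suf, h⟩ | h)
          · injection h with h1 _
            exact absurd h1 hqp
          · exact h

theorem pvRunLoop_none (l : List String) :
    pvRunLoop l none 1 = true ↔ pvTrip l := by
  cases l with
  | nil => simp [pvRunLoop, pvTrip]
  | cons q t =>
    have hstep : pvRunLoop (q :: t) none 1 = pvRunLoop t (some q) 1 := by
      simp [pvRunLoop]
    rw [hstep, (pvRunLoop_some t q).1, pvTrip_cons_iff]

-- sorted indices are monotone (cited form of PySem's lemma, specialised)
theorem pv_sorted_getElem_mono {s : List String} (hp : s.Pairwise (· ≤ ·))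
    {i j : Nat} (hij : i ≤ j) (hj : j < s.length) :
    s[i]'(lt_of_le_of_lt hij hj) ≤ s[j] := by
  rcases lt_or_eq_of_le hij with h | h
  · exact (List.pairwise_iff_getElem.mp hp) i j _ hj h
  · subst h; exact le_refl _

-- in a Pairwise-(≤) list, three equal consecutive elements exist iff some value occurs ≥ 3 times
theorem pvTrip_iff_count (s : List String) (hp : s.Pairwise (· ≤ ·)) :
    pvTrip s ↔ ∃ x, 3 ≤ s.count x := by
  constructor
  · rintro ⟨pre, x, suf, rfl⟩
    refine ⟨x, ?_⟩
    simp [List.count_append]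
    omega
  · rintro ⟨x, hx⟩
    have hsub : List.Sublist (List.replicate 3 x) s := List.replicate_sublist_iff.mpr hx
    obtain ⟨is, his, hlt⟩ := List.sublist_eq_map_getElem hsub
    have hlen3 : is.length = 3 := by
      have := congrArg List.length his; simpa using this.symm
    obtain ⟨i1, i2, i3, rfl⟩ := List.length_eq_three.mp hlen3
    simp only [List.map, List.replicate, List.cons.injEq] at his
    obtain ⟨h1, h2, h3, -⟩ := his
    simp only [Fin.getElem_fin] at h1 h2 h3
    simp only [List.pairwise_cons, List.mem_cons] at hlt
    have hi12 : (i1 : Nat) < i2 := hlt.1 _ (Or.inl rfl)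
    have hi23 : (i2 : Nat) < i3 := hlt.2.1 _ (Or.inl rfl)
    have hlen : (i1 : Nat) + 2 < s.length := by have := i3.isLt; omega
    have h1l : (i1 : Nat) < s.length := by omega
    have h2l : (i1 : Nat) + 1 < s.length := by omega
    -- s[i1] = s[i1+2] by squeezing between equal endpoints
    have hends : s[(i1:Nat)] = s[(i3:Nat)] := by rw [← h1, ← h3]
    have heq2 : s[(i1:Nat)]'h1l = s[(i1:Nat)+2]'hlen := by
      have a := pv_sorted_getElem_mono hp (show (i1:Nat) ≤ (i1:Nat)+2 by omega) hlen
      have b := pv_sorted_getElem_mono hp (show (i1:Nat)+2 ≤ (i3:Nat) by omega) i3.isLt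
      exact le_antisymm a (hends ▸ b)
    have heq1 : s[(i1:Nat)]'h1l = s[(i1:Nat)+1]'h2l := by
      have a := pv_sorted_getElem_mono hp (show (i1:Nat) ≤ (i1:Nat)+1 by omega) h2l
      have b := pv_sorted_getElem_mono hp (show (i1:Nat)+1 ≤ (i1:Nat)+2 by omega) hlen
      exact le_antisymm a (heq2 ▸ b)
    refine ⟨s.take (i1:Nat), s[(i1:Nat)]'h1l, s.drop ((i1:Nat)+3), ?_⟩
    have hdrop : s.drop (i1:Nat) =
        s[(i1:Nat)]'h1l :: s[(i1:Nat)+1]'h2l :: s[(i1:Nat)+2]'hlen :: s.drop ((i1:Nat)+3) := by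
      rw [List.drop_eq_getElem_cons h1l, List.drop_eq_getElem_cons h2l,
        List.drop_eq_getElem_cons hlen]
    calc s = s.take (i1:Nat) ++ s.drop (i1:Nat) := (List.take_append_drop _ s).symm
      _ = _ := by rw [hdrop, ← heq1, ← heq2]

-- A's dict-counting result, characterised: some phrase occurs more than twice.
theorem pv_A_side (l : List String) :
    ((l.foldl (fun d p => d.insert p (d.getD p 0 + 1)) (PySem.Dict.empty : PySem.Dict String Int)).values.any
      (fun c => c > 2)) = true ↔ ∃ x, 3 ≤ l.count x := by
  rw [PySem.Dict.foldl_insert_getD_add_one_eq_counter]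
  rw [show (PySem.Dict.counter l).values = (PySem.Dict.counter l).items.map (·.2) from rfl]
  rw [PySem.Dict.items_counter, List.map_map, List.any_eq_true]
  constructor
  · rintro ⟨c, hc, hgt⟩
    obtain ⟨k, _, rfl⟩ := List.mem_map.mp hc
    simp only [Function.comp, decide_eq_true_eq] at hgt
    exact ⟨k, by exact_mod_cast hgt⟩
  · rintro ⟨x, hx⟩
    have hmem : x ∈ l := List.count_pos_iff.mp (by omega)
    refine ⟨((x, (l.count x : Int)) : String × Int).2, List.mem_map.mpr ⟨x, (PySem.Set.mem_ofList l x).mpr hmem, rfl⟩, ?_⟩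
    simp only [decide_eq_true_eq]
    exact_mod_cast hx

-- the two ways of building the 3-word phrase list coincide
theorem pv_phrases_eq (words : List String) (h : 10 ≤ words.length) :
    (PySem.List.pyRange 0 ((words.length : Int) - 2) 1).map
      (fun i => PySem.Str.join " " (PySem.List.slice words (some i) (some (i + 3)))) =
    (words.zip ((PySem.List.slice words (some 1) none).zip
                (PySem.List.slice words (some 2) none))).map
      (fun t => PySem.Str.join " " [t.1, t.2.1, t.2.2]) := by
  rw [PySem.List.slice_from_one,
    show ((2:Int)) = ((2:Nat):Int) from rfl, PySem.List.slice_from_natCast,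
    ← List.drop_one]
  apply List.ext_getElem
  · simp [PySem.List.length_pyRange_one]
    omega
  · intro i hi1 hi2
    have hlen : i + 2 < words.length := by
      simp [PySem.List.length_pyRange_one] at hi1
      omega
    have h0 : i < words.length := by omega
    have h1 : i + 1 < words.length := by omega
    rw [List.getElem_map, List.getElem_map, PySem.List.getElem_pyRange_one, List.getElem_zip,
      List.getElem_zip, List.getElem_drop, List.getElem_drop]
    have hslice : PySem.List.slice words (some ((i:Nat):Int)) (some (((i:Nat):Int) + 3)) =
        (words.drop i).take 3 := by
      have := PySem.List.slice_natCast_add words i 3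
      simpa using this
    simp only [zero_add]
    rw [hslice]
    have hdrop : words.drop i = words[i] :: words[i+1] :: words[i+2] :: words.drop (i+3) := by
      rw [List.drop_eq_getElem_cons h0, List.drop_eq_getElem_cons h1,
        List.drop_eq_getElem_cons hlen]
    simp [Nat.add_comm]
    rw [hdrop]
    rfl

-- ===== VERDICT (by name: the statement is the Claim_ definition above) =====
theorem has_repeated_phrases_spec : Claim_equal_has_repeated_phrases := by
  intro text _
  unfold Spec_has_repeated_phrases has_repeated_phrases has_repeated_phrases_alt
  by_cases h : (PySem.Str.split₀ text).length < 10
  · simp [h]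
  · simp only [h, if_false]
    rw [pv_phrases_eq _ (by omega), Bool.eq_iff_iff]
    set l := (((PySem.Str.split₀ text).zip _).map _) with hl
    rw [pv_A_side, pvRunLoop_none,
      pvTrip_iff_count _ (PySem.List.sorted_pairwise l (fun x => x)),
      ]
    constructor
    · rintro ⟨x, hx⟩
      exact ⟨x, by rw [(PySem.List.sorted_perm l (fun x => x) false).count_eq]; exact hx⟩
    · rintro ⟨x, hx⟩
      exact ⟨x, by rw [← (PySem.List.sorted_perm l (fun x => x) false).count_eq]; exact hx⟩
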